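-- pv_equiv track=rewrite | github.com/Raiksler/Scripts | OZON contest/emp_test.py | uniq_task_checker
-- ===== SOURCE A (Python) =====
-- def uniq_task_checker(ids):
--     unic_task = set()
--     prev_task = None
--     for item in ids:
--         if item in unic_task and item != prev_task:
--             return 'NO'
--         elif item not in unic_task:
--             unic_task.add(item)
--         prev_task = item
--     return 'YES'
-- ===== SOURCE B (Python) =====
-- def uniq_task_checker(ids):
--     # Collapse each run of adjacent duplicates to a single key (the run's last
--     # element), then the schedule is valid iff all run keys are distinct.
--     keys = [x for x, y in zip(ids, ids[1:]) if x != y] + ids[-1:]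
--     return 'YES' if len(keys) == len(set(keys)) else 'NO'
-- ===== Notes on version B (the rewrite author's own statement) =====
-- stated objective: alternative
-- what changed: A scans once online with a seen-set plus prev tracking and early-returns; B first collapses adjacent runs to their key sequence via zip(ids, ids[1:]) and answers by comparing len(keys) with len(set(keys)) (distinctness by cardinality), with no early return and no prev state.
import Mathlib
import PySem

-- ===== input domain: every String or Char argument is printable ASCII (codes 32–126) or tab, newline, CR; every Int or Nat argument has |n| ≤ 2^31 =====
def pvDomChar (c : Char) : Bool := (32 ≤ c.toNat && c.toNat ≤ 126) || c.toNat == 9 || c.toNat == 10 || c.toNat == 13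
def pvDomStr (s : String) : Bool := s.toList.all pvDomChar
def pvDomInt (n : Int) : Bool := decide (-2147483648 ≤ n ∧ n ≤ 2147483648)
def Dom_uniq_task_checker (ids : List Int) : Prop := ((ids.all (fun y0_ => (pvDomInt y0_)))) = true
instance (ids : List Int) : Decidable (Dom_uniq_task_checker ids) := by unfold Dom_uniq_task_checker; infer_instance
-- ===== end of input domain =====

-- B collapses adjacent runs to their key sequence and checks distinctness by
-- comparing lengths with the key set, instead of A's online seen-set + prev scan.


-- ===== PORT A =====
-- literal port of A's loop: state = (seen set, prev), early return 'NO'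
def uniqGoA : List Int → PySem.Set Int → Option Int → String
  | [], _, _ => "YES"
  | item :: rest, s, prev =>
      if PySem.Set.contains s item = true ∧ prev ≠ some item then "NO"
      else if PySem.Set.contains s item = false then uniqGoA rest (PySem.Set.add s item) (some item)
      else uniqGoA rest s (some item)

def uniq_task_checker (ids : List Int) : String :=
  uniqGoA ids PySem.Set.empty none

-- ===== PORT B =====
def uniq_task_checker_alt (ids : List Int) : String :=
  -- keys = [x for x, y in zip(ids, ids[1:]) if x != y] + ids[-1:]
  let keys := ((ids.zip (PySem.List.slice ids (some 1) none)).filter (fun p => p.1 ≠ p.2)).map Prod.fst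
              ++ PySem.List.slice ids (some (-1)) none
  if keys.length = (PySem.Set.ofList keys).length then "YES" else "NO"

-- ===== PRECONDITION & SPEC =====
def Spec_uniq_task_checker (ids : List Int) (out : String) : Prop := out = uniq_task_checker_alt ids
instance (ids : List Int) (out : String) : Decidable (Spec_uniq_task_checker ids out) := by unfold Spec_uniq_task_checker; infer_instance

-- ===== CLAIM (what is proved, stated in full; the proofs are below) =====
def Claim_equal_uniq_task_checker : Prop := ∀ (ids : List Int), Dom_uniq_task_checker ids → Spec_uniq_task_checker ids (uniq_task_checker ids)

-- ===== LEMMAS AND PROOFS =====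

-- run keys: one representative per maximal run of adjacent equal elements
def rk : List Int → List Int
  | [] => []
  | [x] => [x]
  | x :: y :: rest => if x = y then rk (y :: rest) else x :: rk (y :: rest)

-- prev-aware run keys (A's point of view)
def rkAux : Option Int → List Int → List Int
  | _, [] => []
  | prev, x :: rest => if prev = some x then rkAux prev rest else x :: rkAux (some x) rest

theorem rk_cons (x : Int) (l : List Int) : rk (x :: l) = x :: rkAux (some x) l := by
  induction l generalizing x with
  | nil => rfl
  | cons y rest ih =>
      by_cases h : x = y <;> simp [rk, rkAux, h, ih]

theorem rkAux_none (l : List Int) : rkAux none l = rk l := by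
  cases l with
  | nil => rfl
  | cons x rest => simp [rkAux, rk_cons]

-- B's comprehension computes rk
theorem keysB_eq (ids : List Int) :
    ((ids.zip ids.tail).filter (fun p => decide (p.1 ≠ p.2))).map Prod.fst
      ++ ids.drop (ids.length - 1) = rk ids := by
  induction ids with
  | nil => rfl
  | cons x rest ih =>
      cases rest with
      | nil => rfl
      | cons y rest' =>
          by_cases h : x = y <;>
            simp [rk, List.zip, h, ← ih, List.length_cons]

-- characterisation of A's loop
theorem goA_char (ids : List Int) (s : PySem.Set Int) (prev : Option Int)
    (hinv : ∀ p, prev = some p → p ∈ s) :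
    uniqGoA ids s prev =
      if (rkAux prev ids).Nodup ∧ (∀ k ∈ rkAux prev ids, k ∉ s) then "YES" else "NO" := by
  induction ids generalizing s prev with
  | nil => simp [uniqGoA, rkAux]
  | cons x rest ih =>
      by_cases hp : prev = some x
      · have hx : x ∈ s := hinv x hp
        have h1 : ¬ (PySem.Set.contains s x = true ∧ prev ≠ some x) := by
          rw [hp]; simp
        have h2 : ¬ (PySem.Set.contains s x = false) := by
          simp
          exact hx
        have hr : rkAux prev (x :: rest) = rkAux (some x) rest := by
          simp [rkAux, hp]
        rw [hr]
        simp only [uniqGoA, if_neg h1, if_neg h2]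
        exact ih s (some x) (by intro p hpe; cases hpe; exact hx)
      · have hr : rkAux prev (x :: rest) = x :: rkAux (some x) rest := by
          simp [rkAux, hp]
        rw [hr]
        by_cases hx : x ∈ s
        · have h1 : PySem.Set.contains s x = true ∧ prev ≠ some x :=
            ⟨(PySem.Set.contains_iff s x).mpr hx, hp⟩
          simp only [uniqGoA, if_pos h1]
          have hno : ¬ ((x :: rkAux (some x) rest).Nodup ∧ ∀ k ∈ x :: rkAux (some x) rest, k ∉ s) := by
            intro ⟨_, hall⟩
            exact hall x (List.mem_cons_self ..) hx
          rw [if_neg hno]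
        · have h1 : ¬ (PySem.Set.contains s x = true ∧ prev ≠ some x) := by
            intro ⟨hc, _⟩
            exact hx ((PySem.Set.contains_iff s x).mp hc)
          have h2 : PySem.Set.contains s x = false := by
            cases hc : PySem.Set.contains s x
            · rfl
            · exact absurd ((PySem.Set.contains_iff s x).mp hc) hx
          simp only [uniqGoA, if_neg h1, if_pos h2]
          rw [ih (PySem.Set.add s x) (some x)
              (by intro p hpe; cases hpe; exact (PySem.Set.mem_add s x x).mpr (Or.inr rfl))]
          congr 1
          have hmem : ∀ k : Int, k ∉ PySem.Set.add s x ↔ (k ∉ s ∧ k ≠ x) := by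
            intro k
            rw [PySem.Set.mem_add s x k]
            tauto
          simp only [List.nodup_cons, List.mem_cons, eq_iff_iff]
          constructor
          · rintro ⟨hn, hall⟩
            refine ⟨⟨?_, hn⟩, ?_⟩
            · intro hxl
              exact ((hmem x).mp (hall x hxl)).2 rfl
            · intro k hk
              rcases hk with rfl | hk
              · exact hx
              · exact ((hmem k).mp (hall k hk)).1
          · rintro ⟨⟨hxl, hn⟩, hall⟩
            refine ⟨hn, ?_⟩
            intro k hk
            refine (hmem k).mpr ⟨hall k (Or.inr hk), ?_⟩
            rintro rfl
            exact hxl hk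

-- Set.ofList is a sublist (keeps first occurrences in order)
theorem ofList_sublist (l : List Int) : (PySem.Set.ofList l).Sublist l := by
  induction l with
  | nil => simp [PySem.Set.ofList_nil]
  | cons x rest ih =>
      rw [PySem.Set.ofList_cons]
      refine List.Sublist.cons₂ x (List.Sublist.trans ?_ ih)
      simp only [PySem.Set.discard]
      exact List.filter_sublist

theorem nodup_iff_len (l : List Int) :
    l.length = (PySem.Set.ofList l).length ↔ l.Nodup := by
  constructor
  · intro h
    have he := (ofList_sublist l).eq_of_length h.symm
    rw [← he]
    exact PySem.Set.nodup_ofList l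
  · intro h
    rw [PySem.Set.ofList_eq_self_of_nodup l h]

-- ===== VERDICT (by name: the statement is the Claim_ definition above) =====
theorem uniq_task_checker_spec : Claim_equal_uniq_task_checker := by
  intro ids _
  unfold Spec_uniq_task_checker uniq_task_checker uniq_task_checker_alt
  rw [goA_char ids PySem.Set.empty none (by intro p h; cases h)]
  rw [rkAux_none]
  rw [PySem.List.slice_from_one, PySem.List.slice_from_neg_one, keysB_eq]
  by_cases h : (rk ids).Nodup
  · rw [if_pos ⟨h, by intro k _ hk; simp [PySem.Set.empty] at hk⟩, if_pos ((nodup_iff_len _).mpr h)]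
  · rw [if_neg (by intro ⟨hn, _⟩; exact h hn),
        if_neg (by intro hl; exact h ((nodup_iff_len _).mp hl))]
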